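-- pv_equiv track=rewrite | github.com/0xJJphy/alt-scraper | alts_scraper.py | _select_best_narrative
-- ===== SOURCE A (Python) =====
-- from typing import Dict, List, Optional
--
-- def _select_best_narrative(categories: List[str]) -> str:
--     """Pick the most significant narrative from a list of categories."""
--     if not categories: return "Unknown"
--     generic_terms = ["Ecosystem", "Standard", "Portfolio", "Asset-Backed", "Wrapped", "Index", "SEC Securities", "Alleged", "FTX Holdings", "Multicoin Capital", "Alameda Research", "GMCI", "Proof of", "Made in", "CoinList", "Launchpad", "Research", "Ventures", "Capital"]
--     specific = [c for c in categories if not any(x in c for x in generic_terms)]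
--     if specific:
--         detailed = [c for c in specific if c not in ["Layer 1 (L1)", "Layer 2 (L2)", "Smart Contract Platform"]]
--         return detailed[0] if detailed else specific[0]
--     return categories[0]
-- ===== SOURCE B (Python) =====
-- def _select_best_narrative(categories):
--     """Pick the most significant narrative from a list of categories."""
--     if not categories:
--         return "Unknown"
--     generic_terms = ["Ecosystem", "Standard", "Portfolio", "Asset-Backed", "Wrapped", "Index", "SEC Securities", "Alleged", "FTX Holdings", "Multicoin Capital", "Alameda Research", "GMCI", "Proof of", "Made in", "CoinList", "Launchpad", "Research", "Ventures", "Capital"]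
--     broad = ["Layer 1 (L1)", "Layer 2 (L2)", "Smart Contract Platform"]
--
--     def tier(c):
--         if any(x in c for x in generic_terms):
--             return 2
--         return 1 if c in broad else 0
--
--     _, best = min(enumerate(categories), key=lambda t: (tier(t[1]), t[0]))
--     return best if tier(best) < 2 else categories[0]
-- ===== Notes on version B (the rewrite author's own statement) =====
-- stated objective: alternative
-- what changed: Replaces A's staged filter passes (build 'specific', then 'detailed', then pick a head) by scoring each category into a tier (0 detailed-specific, 1 broad-specific, 2 generic) and taking a single stable argmin of the key (tier, index) over the enumerated list.
import Mathlib
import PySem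

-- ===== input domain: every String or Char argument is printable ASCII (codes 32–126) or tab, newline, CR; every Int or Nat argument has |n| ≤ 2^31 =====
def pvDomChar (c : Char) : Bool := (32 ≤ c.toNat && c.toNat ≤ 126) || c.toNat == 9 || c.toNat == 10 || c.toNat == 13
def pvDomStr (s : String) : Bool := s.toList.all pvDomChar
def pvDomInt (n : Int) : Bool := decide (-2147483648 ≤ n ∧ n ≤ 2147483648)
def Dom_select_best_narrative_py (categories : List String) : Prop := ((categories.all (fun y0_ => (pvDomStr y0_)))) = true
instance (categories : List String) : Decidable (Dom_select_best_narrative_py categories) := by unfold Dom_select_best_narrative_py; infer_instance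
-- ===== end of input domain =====

-- B replaces A's staged filter passes by scoring each category into a tier (0/1/2) and taking a
-- single stable argmin by the key (tier, index) over the enumerated list (alternative algorithm, same cost).

-- ===== PORT A =====
def pvGenericTerms : List String := ["Ecosystem", "Standard", "Portfolio", "Asset-Backed", "Wrapped", "Index", "SEC Securities", "Alleged", "FTX Holdings", "Multicoin Capital", "Alameda Research", "GMCI", "Proof of", "Made in", "CoinList", "Launchpad", "Research", "Ventures", "Capital"]

def pvBroad : List String := ["Layer 1 (L1)", "Layer 2 (L2)", "Smart Contract Platform"]

def select_best_narrative_py (categories : List String) : String :=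
  if categories = [] then "Unknown"
  else
    let specific := categories.filter (fun c => !(pvGenericTerms.any (fun x => PySem.Str.isIn x c)))
    if specific ≠ [] then
      let detailed := specific.filter (fun c => !(decide (c ∈ pvBroad)))
      if detailed ≠ [] then detailed.headD "" else specific.headD ""
    else categories.headD ""

-- ===== PORT B =====
-- Source B's inner 'def tier(c)': 2 if generic, 1 if broad, else 0
def pvTier (c : String) : Nat :=
  if pvGenericTerms.any (fun x => PySem.Str.isIn x c) then 2
  else if c ∈ pvBroad then 1 else 0

def select_best_narrative_py_alt (categories : List String) : String :=
  if categories = [] then "Unknown"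
  else
    -- min(enumerate(categories), key=lambda t: (tier(t[1]), t[0]))
    match PySem.List.min2? (PySem.List.enumerate categories) (fun t => pvTier t.2) (fun t => t.1) with
    | some best => if pvTier best.2 < 2 then best.2 else categories.headD ""
    | none => ""   -- unreachable: categories is nonempty here

-- ===== PRECONDITION & SPEC =====
def Spec_select_best_narrative_py (categories : List String) (out : String) : Prop := out = select_best_narrative_py_alt categories
instance (categories : List String) (out : String) : Decidable (Spec_select_best_narrative_py categories out) := by unfold Spec_select_best_narrative_py; infer_instance

-- ===== CLAIM (what is proved, stated in full; the proofs are below) =====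
def Claim_equal_select_best_narrative_py : Prop := ∀ (categories : List String), Dom_select_best_narrative_py categories → Spec_select_best_narrative_py categories (select_best_narrative_py categories)

-- ===== LEMMAS AND PROOFS =====

-- the element min2? picks: first tier-0 pair, else first tier-1 pair, else the seed m
def pvPick (ns : List (Int × String)) (m : Int × String) : Int × String :=
  match (ns.filter (fun p => decide (pvTier p.2 = 0))).head? with
  | some d => d
  | none =>
    match (ns.filter (fun p => decide (pvTier p.2 = 1))).head? with
    | some s => s
    | none => m

theorem pvTier_cases (c : String) : pvTier c = 0 ∨ pvTier c = 1 ∨ pvTier c = 2 := by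
  unfold pvTier; split_ifs <;> simp

-- the comparison step of min2? with key (tier, index), named so proofs can speak about it
def pvStep (acc : Option (Int × String)) (x : Int × String) : Option (Int × String) :=
  match acc with
  | none => some x
  | some m =>
    if (decide (pvTier x.2 < pvTier m.2) ||
        !decide (pvTier m.2 < pvTier x.2) && decide (x.1 < m.1)) = true then some x else some m

theorem pvMin2_eq_foldl (l : List (Int × String)) :
    PySem.List.min2? l (fun t => pvTier t.2) (fun t => t.1) = l.foldl pvStep none := by
  unfold PySem.List.min2?
  congr 1
  funext acc x
  cases acc <;> rfl

theorem pvStep_none (x : Int × String) : pvStep none x = some x := rfl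

theorem pvMin2_fold_char (l : List (Int × String)) (m : Int × String)
    (h : (m :: l).Pairwise (fun p q => p.1 < q.1)) :
    l.foldl pvStep (some m) = some (pvPick (m :: l) m) := by
  induction l generalizing m with
  | nil =>
    rcases pvTier_cases m.2 with h0 | h0 | h0 <;> simp [pvPick, h0]
  | cons p l ih =>
    have hlt : m.1 < p.1 := (List.pairwise_cons.mp h).1 p (by simp)
    have hpl : (p :: l).Pairwise (fun p q => p.1 < q.1) := (List.pairwise_cons.mp h).2
    have hml : (m :: l).Pairwise (fun p q => p.1 < q.1) :=
      h.sublist (by exact List.Sublist.cons₂ m (List.sublist_cons_self p l))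
    simp only [List.foldl_cons, pvStep]
    by_cases hc : pvTier p.2 < pvTier m.2
    · have : (decide (pvTier p.2 < pvTier m.2) ||
          !decide (pvTier m.2 < pvTier p.2) && decide (p.1 < m.1)) = true := by
        simp [hc]
      simp only [this, if_pos]
      rw [ih p hpl]
      congr 1
      rcases pvTier_cases m.2 with h0 | h0 | h0 <;>
        rcases pvTier_cases p.2 with h1 | h1 | h1 <;>
          rw [h0, h1] at hc <;>
          first
            | exact absurd hc (by omega)
            | simp [pvPick, h0, h1]
    · have : (decide (pvTier p.2 < pvTier m.2) ||
          !decide (pvTier m.2 < pvTier p.2) && decide (p.1 < m.1)) = false := by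
        simp [hc]; omega
      simp only [this, Bool.false_eq_true, if_neg, not_false_iff]
      rw [ih m hml]
      congr 1
      rcases pvTier_cases m.2 with h0 | h0 | h0 <;>
        rcases pvTier_cases p.2 with h1 | h1 | h1 <;>
          rw [h0, h1] at hc <;>
          first
            | exact absurd hc (by omega)
            | simp [pvPick, h0, h1]

theorem head?_filter_enumerate (l : List String) (s : Int) (q : String → Bool) :
    (((PySem.List.enumerate l s).filter (fun p => q p.2)).head?).map (·.2) = (l.filter q).head? := by
  induction l generalizing s with
  | nil => simp [PySem.List.enumerate_nil]
  | cons c t ih =>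
    simp only [List.head?_filter] at ih ⊢
    rw [PySem.List.enumerate_cons]
    by_cases hq : q c = true <;> simp [hq, ih]

theorem pvTier_of_generic {c : String}
    (hg : (pvGenericTerms.any (fun x => PySem.Str.isIn x c)) = true) : pvTier c = 2 := by
  unfold pvTier; rw [if_pos hg]

theorem pvTier_of_broad {c : String}
    (hg : ¬ (pvGenericTerms.any (fun x => PySem.Str.isIn x c)) = true)
    (hb : c ∈ pvBroad) : pvTier c = 1 := by
  unfold pvTier; rw [if_neg hg, if_pos hb]

theorem pvTier_of_other {c : String}
    (hg : ¬ (pvGenericTerms.any (fun x => PySem.Str.isIn x c)) = true)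
    (hb : c ∉ pvBroad) : pvTier c = 0 := by
  unfold pvTier; rw [if_neg hg, if_neg hb]

theorem pvDetailed_eq (L : List String) :
    (L.filter (fun c => !(pvGenericTerms.any (fun x => PySem.Str.isIn x c)))).filter
        (fun c => !(decide (c ∈ pvBroad))) =
      L.filter (fun x => decide (pvTier x = 0)) := by
  rw [List.filter_filter]
  apply List.filter_congr
  intro x _
  cases hgb : (pvGenericTerms.any (fun y => PySem.Str.isIn y x)) with
  | true => rw [pvTier_of_generic hgb]; simp
  | false =>
    by_cases hb : x ∈ pvBroad
    · rw [pvTier_of_broad (ne_true_of_eq_false hgb) hb]; simp [hb]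
    · rw [pvTier_of_other (ne_true_of_eq_false hgb) hb]; simp [hb]

-- ===== VERDICT (by name: the statement is the Claim_ definition above) =====
theorem select_best_narrative_py_spec : Claim_equal_select_best_narrative_py := by
  intro categories _
  unfold Spec_select_best_narrative_py
  cases categories with
  | nil => rfl
  | cons c rest =>
    have hne : (c :: rest : List String) ≠ [] := by simp
    have hpair : ((0, c) :: PySem.List.enumerate rest (0 + 1)).Pairwise
        (fun p q => p.1 < q.1) := by
      have h := PySem.List.pairwise_lt_enumerate (xs := c :: rest) (s := 0)
      rwa [PySem.List.enumerate_cons] at h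
    have hfold : PySem.List.min2? (PySem.List.enumerate (c :: rest))
        (fun t => pvTier t.2) (fun t => t.1)
        = some (pvPick ((0, c) :: PySem.List.enumerate rest (0 + 1)) (0, c)) := by
      rw [pvMin2_eq_foldl, PySem.List.enumerate_cons, List.foldl_cons, pvStep_none]
      exact pvMin2_fold_char _ _ hpair
    have hA0 := head?_filter_enumerate (c :: rest) 0 (fun x => decide (pvTier x = 0))
    have hA1 := head?_filter_enumerate (c :: rest) 0 (fun x => decide (pvTier x = 1))
    rw [PySem.List.enumerate_cons] at hA0 hA1
    rcases h0 : (((0, c) :: PySem.List.enumerate rest (0 + 1)).filter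
        (fun p => decide (pvTier p.2 = 0))).head? with _ | d
    · rcases h1 : (((0, c) :: PySem.List.enumerate rest (0 + 1)).filter
          (fun p => decide (pvTier p.2 = 1))).head? with _ | s
      · -- no tier-0 and no tier-1 element: everything is generic
        rw [h0] at hA0; rw [h1] at hA1
        have hd0 : (c :: rest).filter (fun x => decide (pvTier x = 0)) = [] :=
          List.head?_eq_none_iff.mp hA0.symm
        have hd1 : (c :: rest).filter (fun x => decide (pvTier x = 1)) = [] :=
          List.head?_eq_none_iff.mp hA1.symm
        have ht2 : ∀ x ∈ (c :: rest), pvTier x = 2 := by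
          intro x hx
          have e0 := (List.filter_eq_nil_iff.mp hd0) x hx
          have e1 := (List.filter_eq_nil_iff.mp hd1) x hx
          rcases pvTier_cases x with h | h | h <;> simp_all
        have hspec : (c :: rest).filter
            (fun c => !(pvGenericTerms.any (fun x => PySem.Str.isIn x c))) = [] := by
          apply List.filter_eq_nil_iff.mpr
          intro x hx
          have h2 := ht2 x hx
          cases hgb : (pvGenericTerms.any (fun y => PySem.Str.isIn y x)) with
          | true => simp
          | false =>
            exfalso
            by_cases hb : x ∈ pvBroad
            · rw [pvTier_of_broad (ne_true_of_eq_false hgb) hb] at h2; omega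
            · rw [pvTier_of_other (ne_true_of_eq_false hgb) hb] at h2; omega
        have htc : ¬ pvTier c < 2 := by
          have := ht2 c (by simp); omega
        simp only [select_best_narrative_py, select_best_narrative_py_alt, hfold]
        rw [if_neg hne, if_neg hne, hspec,
          if_neg (by simp : ¬ ([] : List String) ≠ [])]
        simp only [pvPick, h0, h1]
        rw [if_neg htc]
      · -- no tier-0, first tier-1 element s: A returns specific[0]
        rw [h0] at hA0; rw [h1] at hA1
        have hd0 : (c :: rest).filter (fun x => decide (pvTier x = 0)) = [] :=
          List.head?_eq_none_iff.mp hA0.symm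
        have hnot0 : ∀ x ∈ (c :: rest), ¬ pvTier x = 0 := by
          intro x hx; exact of_decide_eq_false (by
            have := (List.filter_eq_nil_iff.mp hd0) x hx; simpa using this)
        have hspec : (c :: rest).filter
            (fun c => !(pvGenericTerms.any (fun x => PySem.Str.isIn x c))) =
            (c :: rest).filter (fun x => decide (pvTier x = 1)) := by
          apply List.filter_congr
          intro x hx
          have hx0 := hnot0 x hx
          cases hgb : (pvGenericTerms.any (fun y => PySem.Str.isIn y x)) with
          | true => rw [pvTier_of_generic hgb]; simp
          | false =>
            by_cases hb : x ∈ pvBroad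
            · rw [pvTier_of_broad (ne_true_of_eq_false hgb) hb]; simp
            · exact absurd (pvTier_of_other (ne_true_of_eq_false hgb) hb) hx0
        have hdet : ((c :: rest).filter
            (fun c => !(pvGenericTerms.any (fun x => PySem.Str.isIn x c)))).filter
            (fun c => !(decide (c ∈ pvBroad))) = [] := by
          rw [pvDetailed_eq, hd0]
        have hs1 : pvTier s.2 = 1 := by
          have hmem : s ∈ ((0, c) :: PySem.List.enumerate rest (0 + 1)).filter
              (fun p => decide (pvTier p.2 = 1)) := List.mem_of_mem_head? (by rw [h1]; simp)
          simpa using (List.mem_filter.mp hmem).2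
        have hsne : (c :: rest).filter (fun x => decide (pvTier x = 1)) ≠ [] := by
          intro h; rw [h] at hA1; simp at hA1
        have hshead : ((c :: rest).filter (fun x => decide (pvTier x = 1))).headD "" = s.2 := by
          rw [List.headD_eq_head?_getD, ← hA1]; simp
        simp only [select_best_narrative_py, select_best_narrative_py_alt, hfold]
        rw [if_neg hne, if_neg hne, hdet, hspec,
          if_pos hsne, if_neg (by simp : ¬ ([] : List String) ≠ []), hshead]
        simp only [pvPick, h0, h1]
        rw [hs1]
        norm_num
    · -- a first tier-0 element d exists: A returns detailed[0]
      rw [h0] at hA0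
      have hd2 : pvTier d.2 = 0 := by
        have hmem : d ∈ ((0, c) :: PySem.List.enumerate rest (0 + 1)).filter
            (fun p => decide (pvTier p.2 = 0)) := List.mem_of_mem_head? (by rw [h0]; simp)
        simpa using (List.mem_filter.mp hmem).2
      have hdet := pvDetailed_eq (c :: rest)
      have hdne : ((c :: rest).filter
          (fun c => !(pvGenericTerms.any (fun x => PySem.Str.isIn x c)))).filter
          (fun c => !(decide (c ∈ pvBroad))) ≠ [] := by
        rw [hdet]; intro h; rw [h] at hA0; simp at hA0
      have hsne : (c :: rest).filter
          (fun c => !(pvGenericTerms.any (fun x => PySem.Str.isIn x c))) ≠ [] := by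
        intro h
        exact hdne (by rw [h]; rfl)
      have hdhead : (((c :: rest).filter
          (fun c => !(pvGenericTerms.any (fun x => PySem.Str.isIn x c)))).filter
          (fun c => !(decide (c ∈ pvBroad)))).headD "" = d.2 := by
        rw [hdet, List.headD_eq_head?_getD, ← hA0]; simp
      simp only [select_best_narrative_py, select_best_narrative_py_alt, hfold]
      rw [if_neg hne, if_neg hne, if_pos hsne, if_pos hdne, hdhead]
      simp only [pvPick, h0]
      rw [hd2]
      norm_num
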